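-- pv_equiv track=rewrite | github.com/theptrk/arc-prize-2024 | synthesis.py | find_walled_group_positions
-- ===== SOURCE A (Python) =====
-- def copy_grid(grid, empty=False):
--     new_grid = []
--     for row in grid:
--         if empty:
--             new_grid.append([0 for _ in row])
--         else:
--             new_grid.append([el for el in row])
--     return new_grid
--
-- def find_walled_group_positions(grid, wall_color):
--     """
--     wrote solving: 09629e4f
--     """
--     grid = copy_grid(grid)
--
--     n_rows = len(grid)
--     n_cols = len(grid[0])
--
--     wall_group_positions = []
--
--     group_set = None
--
--     def traverse(i, j):
--         if (i,j) in group_set: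
--             return
--         if i < 0 or i >= n_rows or j < 0 or j >= n_cols:
--             return
--         if grid[i][j] == wall_color:
--             return
--
--         group_set.add((i,j))
--         grid[i][j] = wall_color
--         traverse(i + 1, j)
--         traverse(i - 1, j)
--         traverse(i, j + 1)
--         traverse(i, j - 1)
--
--     for i in range(n_rows):
--         for j in range(n_cols):
--             if grid[i][j] != wall_color:
--                 group_set = set()
--                 traverse(i, j)
--                 new_group = sorted(list(group_set))
--                 wall_group_positions.append(new_group)
--     return wall_group_positions
-- ===== SOURCE B (Python) =====
-- def find_walled_group_positions(grid, wall_color):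
--     n_rows = len(grid)
--     n_cols = len(grid[0])
--
--     seen = set()
--     groups = []
--     for i in range(n_rows):
--         for j in range(n_cols):
--             if grid[i][j] != wall_color and (i, j) not in seen:
--                 comp = []
--                 stack = [(i, j)]
--                 while stack:
--                     a, b = stack.pop()
--                     if (a, b) in seen:
--                         continue
--                     if a < 0 or a >= n_rows or b < 0 or b >= n_cols:
--                         continue
--                     if grid[a][b] == wall_color:
--                         continue
--                     seen.add((a, b))
--                     comp.append((a, b))
--                     stack.extend(((a, b - 1), (a, b + 1), (a - 1, b), (a + 1, b)))
--                 groups.append(sorted(comp))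
--     return groups
-- ===== Notes on version B (the rewrite author's own statement) =====
-- stated objective: alternative
-- what changed: Replaces A's recursive flood fill, which deep-copies the grid and marks visited cells by overwriting them with wall_color, by an iterative explicit-stack flood fill over a single global 'seen' set (no grid copy, no mutation, no recursion); groups are discovered in the same row-major scan and each group is sorted, so the return value is identical.
-- outside the precondition, e.g. on find_walled_group_positions([], 0): A raises IndexError, B raises IndexError; on find_walled_group_positions([[1, 2, 3], [1]], 9): A raises IndexError, B raises IndexError
import Mathlib
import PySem

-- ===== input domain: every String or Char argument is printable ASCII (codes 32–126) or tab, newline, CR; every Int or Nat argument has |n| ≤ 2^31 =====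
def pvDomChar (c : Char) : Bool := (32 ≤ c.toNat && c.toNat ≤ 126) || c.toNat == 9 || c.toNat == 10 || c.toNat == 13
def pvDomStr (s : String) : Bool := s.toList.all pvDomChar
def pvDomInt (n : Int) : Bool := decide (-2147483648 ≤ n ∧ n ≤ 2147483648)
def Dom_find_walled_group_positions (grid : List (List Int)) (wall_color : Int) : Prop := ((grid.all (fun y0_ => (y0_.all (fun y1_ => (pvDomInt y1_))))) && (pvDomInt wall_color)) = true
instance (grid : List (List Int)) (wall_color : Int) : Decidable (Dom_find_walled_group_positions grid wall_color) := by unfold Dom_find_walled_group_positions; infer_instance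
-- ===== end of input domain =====

-- B replaces A's recursive flood fill over a mutated grid copy by an iterative explicit-stack
-- flood fill with a global 'seen' set (no grid copy, no mutation, no recursion); same return value.

-- ===== PORT A =====
-- grid[i][j] (read only behind the in-bounds guards; default irrelevant there)
def pvCell (g : List (List Int)) (i j : Int) : Int :=
  PySem.List.pyGetD (PySem.List.pyGetD g i []) j 0

-- grid[i][j] = v (only used with 0 ≤ i, 0 ≤ j in bounds, where toNat is exact)
def pvSetCell (g : List (List Int)) (i j v : Int) : List (List Int) :=
  g.set i.toNat ((g.getD i.toNat []).set j.toNat v)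

-- A's recursive 'traverse' on the state (mutated grid, group_set); Python recursion is ported
-- with a fuel parameter; the caller passes fuel n_rows*n_cols+1, which is never exhausted
-- (each guard-passing call marks a fresh in-bounds non-wall cell, so call depth ≤ n_rows*n_cols+1).
def pvTravA (w nr nc : Int) : Nat → (List (List Int) × List (Int × Int)) → Int → Int →
    (List (List Int) × List (Int × Int))
  | 0, st, _, _ => st
  | Nat.succ f, st, i, j =>
    if (i, j) ∈ st.2 then st
    else if i < 0 ∨ nr ≤ i ∨ j < 0 ∨ nc ≤ j then st
    else if pvCell st.1 i j = w then st
    else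
      let st1 := (pvSetCell st.1 i j w, PySem.Set.add st.2 (i, j))
      let st2 := pvTravA w nr nc f st1 (i + 1) j
      let st3 := pvTravA w nr nc f st2 (i - 1) j
      let st4 := pvTravA w nr nc f st3 i (j + 1)
      pvTravA w nr nc f st4 i (j - 1)

-- copy_grid(grid) is a deep copy; in this pure model the copy is the value 'grid' itself.
def find_walled_group_positions (grid : List (List Int)) (wall_color : Int) : List (List (Int × Int)) :=
  let nr : Int := grid.length
  let nc : Int := (PySem.List.pyGetD grid 0 []).length
  let fuel : Nat := grid.length * (PySem.List.pyGetD grid 0 []).length + 1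
  ((PySem.List.pyRange 0 nr 1).foldl (fun st i =>
    (PySem.List.pyRange 0 nc 1).foldl (fun st j =>
      if pvCell st.1 i j ≠ wall_color then
        let st' := pvTravA wall_color nr nc fuel (st.1, []) i j
        (st'.1, st.2 ++ [PySem.List.sorted2 st'.2 Prod.fst Prod.snd])
      else st) st)
    (grid, ([] : List (List (Int × Int))))).2

-- ===== PORT B =====
-- number of in-window cells that are not walls and not yet seen (termination measure for the
-- while-loop below; also the induction measure of the proofs)
def pvFree (g0 : List (List Int)) (w nr nc : Int) (seen : List (Int × Int)) : Nat :=
  (((PySem.List.pyRange 0 nr 1).flatMap (fun i =>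
      (PySem.List.pyRange 0 nc 1).map (fun j => (i, j)))).countP
    (fun c => decide (pvCell g0 c.1 c.2 ≠ w ∧ c ∉ seen)))

lemma pvCountP_lt {α : Type} (p q : α → Bool) (c : α) (hpq : ∀ x, p x = true → q x = true)
    (hq : q c = true) (hp : p c = false) :
    ∀ L : List α, c ∈ L → L.countP p < L.countP q := by
  intro L hc
  induction L with
  | nil => cases hc
  | cons x L ih =>
    rcases List.mem_cons.1 hc with rfl | hcL
    · simp only [List.countP_cons, hp, hq, Bool.false_eq_true, if_false, if_true]
      have := List.countP_mono_left (l := L) (p := p) (q := q) (fun x _ => hpq x)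
      omega
    · have h1 := ih hcL
      simp only [List.countP_cons]
      have h2 : (if p x = true then 1 else 0) ≤ (if q x = true then 1 else 0) := by
        by_cases h : p x = true <;> simp_all [hpq x]
      omega

lemma pvFree_add_lt (g0 : List (List Int)) (w nr nc : Int) (seen : List (Int × Int))
    (a b : Int) (h1 : ¬ ((a, b) ∈ seen)) (h2 : ¬ (a < 0 ∨ nr ≤ a ∨ b < 0 ∨ nc ≤ b))
    (h3 : ¬ (pvCell g0 a b = w)) :
    pvFree g0 w nr nc (PySem.Set.add seen (a, b)) < pvFree g0 w nr nc seen := by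
  apply pvCountP_lt
  · intro x hx
    simp only [decide_eq_true_eq] at hx ⊢
    exact ⟨hx.1, fun hm => hx.2 ((PySem.Set.mem_add _ _ _).2 (Or.inl hm))⟩
  · simp only [decide_eq_true_eq]
    exact ⟨h3, h1⟩
  · simp only [decide_eq_false_iff_not, not_and, not_not]
    intro _
    exact (PySem.Set.mem_add _ _ _).2 (Or.inr rfl)
  · simp only [List.mem_flatMap, List.mem_map, PySem.List.mem_pyRange_one]
    exact ⟨a, by omega, b, by omega, rfl⟩

-- the while-loop of B: stack kept top-first (Lean head = Python list end, where B pops/pushes)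
def pvRunB (g0 : List (List Int)) (w nr nc : Int) :
    List (Int × Int) → List (Int × Int) → List (Int × Int) → List (Int × Int) × List (Int × Int)
  | seen, comp, [] => (seen, comp)
  | seen, comp, (a, b) :: rest =>
    if h1 : (a, b) ∈ seen then pvRunB g0 w nr nc seen comp rest
    else if h2 : a < 0 ∨ nr ≤ a ∨ b < 0 ∨ nc ≤ b then pvRunB g0 w nr nc seen comp rest
    else if h3 : pvCell g0 a b = w then pvRunB g0 w nr nc seen comp rest
    else
      pvRunB g0 w nr nc (PySem.Set.add seen (a, b)) (comp ++ [(a, b)])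
        ((a + 1, b) :: (a - 1, b) :: (a, b + 1) :: (a, b - 1) :: rest)
  termination_by seen _ stack => (pvFree g0 w nr nc seen, stack.length)
  decreasing_by
  · exact Prod.Lex.right _ (by simp)
  · exact Prod.Lex.right _ (by simp)
  · exact Prod.Lex.right _ (by simp)
  · exact Prod.Lex.left _ _ (pvFree_add_lt g0 w nr nc seen a b h1 h2 h3)

def find_walled_group_positions_alt (grid : List (List Int)) (wall_color : Int) :
    List (List (Int × Int)) :=
  let nr : Int := grid.length
  let nc : Int := (PySem.List.pyGetD grid 0 []).length
  ((PySem.List.pyRange 0 nr 1).foldl (fun st i =>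
    (PySem.List.pyRange 0 nc 1).foldl (fun st j =>
      if pvCell grid i j ≠ wall_color ∧ (i, j) ∉ st.1 then
        let r := pvRunB grid wall_color nr nc st.1 [] [(i, j)]
        (r.1, st.2 ++ [PySem.List.sorted2 r.2 Prod.fst Prod.snd])
      else st) st)
    (([] : List (Int × Int)), ([] : List (List (Int × Int))))).2

-- ===== PRECONDITION & SPEC =====
-- Pre_ excludes exactly the inputs where A raises IndexError: the empty grid (grid[0]) and
-- grids with some row shorter than row 0 (grid[i][j] in the scan); A returns on everything else.
def Pre_find_walled_group_positions (grid : List (List Int)) (wall_color : Int) : Prop :=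
  grid ≠ [] ∧ ∀ r ∈ grid, (PySem.List.pyGetD grid 0 []).length ≤ r.length

instance (grid : List (List Int)) (wall_color : Int) :
    Decidable (Pre_find_walled_group_positions grid wall_color) := by
  unfold Pre_find_walled_group_positions; infer_instance

def pvWitness_find_walled_group_positions : List (List Int) × Int :=
  ([[1, 0, 2], [0, 1, 0]], 1)

def Spec_find_walled_group_positions (grid : List (List Int)) (wall_color : Int) (out : List (List (Int × Int))) : Prop := out = find_walled_group_positions_alt grid wall_color
instance (grid : List (List Int)) (wall_color : Int) (out : List (List (Int × Int))) : Decidable (Spec_find_walled_group_positions grid wall_color out) := by unfold Spec_find_walled_group_positions; infer_instance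

-- ===== CLAIM (what is proved, stated in full; the proofs are below) =====
def Claim_equal_find_walled_group_positions : Prop := ∀ (grid : List (List Int)) (wall_color : Int), Dom_find_walled_group_positions grid wall_color → Pre_find_walled_group_positions grid wall_color → Spec_find_walled_group_positions grid wall_color (find_walled_group_positions grid wall_color)

-- ===== LEMMAS AND PROOFS =====

-- (i, j) lies in the scanned window
def pvWin (nr nc : Int) (c : Int × Int) : Prop :=
  0 ≤ c.1 ∧ c.1 < nr ∧ 0 ≤ c.2 ∧ c.2 < nc

-- A's mutated grid as a function of the set of visited cells
def pvMask (w : Int) (seen : List (Int × Int)) (g : List (List Int)) : List (List Int) :=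
  seen.foldl (fun g c => pvSetCell g c.1 c.2 w) g

-- invariant on the visited cells: distinct, in the window, originally non-wall
def pvWF (g0 : List (List Int)) (w nr nc : Int) (seen : List (Int × Int)) : Prop :=
  seen.Nodup ∧ ∀ c ∈ seen, pvWin nr nc c ∧ pvCell g0 c.1 c.2 ≠ w

lemma pvMask_append (w : Int) (s t : List (Int × Int)) (g : List (List Int)) :
    pvMask w (s ++ t) g = pvMask w t (pvMask w s g) := by
  simp [pvMask, List.foldl_append]

lemma pvSetCell_length (g : List (List Int)) (i j v : Int) :
    (pvSetCell g i j v).length = g.length := by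
  simp [pvSetCell]

lemma pvSetCell_row_length (g : List (List Int)) (i j v : Int) (k : Nat) :
    ((pvSetCell g i j v).getD k []).length = (g.getD k []).length := by
  unfold pvSetCell
  simp only [List.getD, List.getElem?_set]
  by_cases hk : i.toNat = k
  · subst hk
    by_cases h : i.toNat < g.length
    · simp [h, List.getElem?_eq_getElem h]
    · simp [h]
  · simp [hk]

lemma pvMask_length (w : Int) (s : List (Int × Int)) (g : List (List Int)) :
    (pvMask w s g).length = g.length := by
  induction s generalizing g with
  | nil => rfl
  | cons c s ih =>
    rw [show pvMask w (c :: s) g = pvMask w s (pvSetCell g c.1 c.2 w) from rfl, ih,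
      pvSetCell_length]

lemma pvMask_row_length (w : Int) (s : List (Int × Int)) (g : List (List Int)) (k : Nat) :
    ((pvMask w s g).getD k []).length = (g.getD k []).length := by
  induction s generalizing g with
  | nil => rfl
  | cons c s ih =>
    rw [show pvMask w (c :: s) g = pvMask w s (pvSetCell g c.1 c.2 w) from rfl, ih,
      pvSetCell_row_length]

lemma pvCell_setCell_self (g : List (List Int)) (i j v : Int)
    (hi : 0 ≤ i) (hj : 0 ≤ j) (hil : i.toNat < g.length)
    (hjl : j.toNat < (g.getD i.toNat []).length) :
    pvCell (pvSetCell g i j v) i j = v := by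
  unfold pvCell pvSetCell
  rw [PySem.List.pyGetD_of_nonneg _ _ hi, PySem.List.pyGetD_of_nonneg _ _ hj]
  simp only [List.getD, List.getElem?_set, if_pos rfl, if_pos hil]
  have hjl' : j.toNat < (g[i.toNat]?.getD []).length := by simpa [List.getD] using hjl
  simp [List.getElem?_set, hjl']

lemma pvCell_setCell_ne (g : List (List Int)) (i j v a b : Int)
    (hi : 0 ≤ i) (hj : 0 ≤ j) (ha : 0 ≤ a) (hb : 0 ≤ b)
    (hne : (a, b) ≠ (i, j)) :
    pvCell (pvSetCell g i j v) a b = pvCell g a b := by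
  unfold pvCell pvSetCell
  rw [PySem.List.pyGetD_of_nonneg _ _ ha, PySem.List.pyGetD_of_nonneg _ _ ha,
    PySem.List.pyGetD_of_nonneg _ _ hb, PySem.List.pyGetD_of_nonneg _ _ hb]
  by_cases hrow : a = i
  · subst hrow
    have hbj : b ≠ j := by rintro rfl; exact hne rfl
    by_cases hl : a.toNat < g.length
    · simp only [List.getD, List.getElem?_set, if_pos rfl, if_pos hl]
      have hbj'' : j.toNat ≠ b.toNat := by omega
      simp [List.getElem?_set, hbj'']
    · simp [List.getD, List.getElem?_set, hl]
  · have : i.toNat ≠ a.toNat := by omega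
    simp [List.getD, List.getElem?_set, this]

-- reading a cell of the masked grid (the heart of the coupling): seen cells read as wall,
-- unseen cells read their original value
lemma pvCell_mask (g0 : List (List Int)) (w nr nc : Int) (seen : List (Int × Int))
    (hnr : (g0.length : Int) = nr) (hrows : ∀ r ∈ g0, (nc : Int) ≤ (r.length : Int))
    (hWF : pvWF g0 w nr nc seen) (a b : Int) (hwin : pvWin nr nc (a, b)) :
    pvCell (pvMask w seen g0) a b = if (a, b) ∈ seen then w else pvCell g0 a b := by
  induction seen using List.reverseRecOn with
  | nil => simp [pvMask]
  | append_singleton s x ih =>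
    obtain ⟨hnd, hmem⟩ := hWF
    rw [List.nodup_append] at hnd
    have hxs : x ∉ s := by
      intro hxin
      exact hnd.2.2 x hxin x (List.mem_singleton_self x) rfl
    have hWFs : pvWF g0 w nr nc s :=
      ⟨hnd.1, fun c hc => hmem c (List.mem_append_left _ hc)⟩
    have hx := hmem x (List.mem_append_right _ (List.mem_singleton_self x))
    rw [pvMask_append]
    have hmm : pvMask w [x] (pvMask w s g0) = pvSetCell (pvMask w s g0) x.1 x.2 w := rfl
    rw [hmm]
    rcases x with ⟨xi, xj⟩
    by_cases hax : (a, b) = (xi, xj)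
    · obtain ⟨rfl, rfl⟩ := Prod.mk.injEq .. ▸ hax
      have hwinx : pvWin nr nc (a, b) := hx.1
      obtain ⟨h1, h2, h3, h4⟩ := hwinx
      have hlen : a.toNat < (pvMask w s g0).length := by
        rw [pvMask_length]; omega
      have hrow : b.toNat < ((pvMask w s g0).getD a.toNat []).length := by
        rw [pvMask_row_length]
        have halen : a.toNat < g0.length := by omega
        have hmemrow : g0.getD a.toNat [] ∈ g0 := by
          rw [List.getD_eq_getElem g0 [] halen]; exact List.getElem_mem halen
        have := hrows _ hmemrow
        omega
      rw [pvCell_setCell_self _ _ _ _ h1 h3 hlen hrow]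
      simp
    · obtain ⟨ha1, ha2, ha3, ha4⟩ := hwin
      obtain ⟨⟨hx1, hx2, hx3, hx4⟩, _⟩ := hx
      rw [pvCell_setCell_ne _ _ _ _ _ _ hx1 hx3 ha1 ha3 hax]
      rw [ih hWFs]
      have : ((a, b) ∈ s ++ [(xi, xj)]) ↔ ((a, b) ∈ s) := by
        simp [List.mem_append, hax]
      simp only [this]

lemma pvFree_le (g0 : List (List Int)) (w nr nc : Int) (seen : List (Int × Int)) :
    pvFree g0 w nr nc seen ≤ nr.toNat * nc.toNat := by
  unfold pvFree
  refine le_trans (List.countP_le_length) ?_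
  rw [List.length_flatMap]
  have h1 : ∀ i : Int, ((PySem.List.pyRange 0 nc 1).map (fun j => (i, j))).length = nc.toNat := by
    intro i
    simp [PySem.List.length_pyRange_one]
  calc (((PySem.List.pyRange 0 nr 1)).map
        (fun i => ((PySem.List.pyRange 0 nc 1).map (fun j => (i, j))).length)).sum
      = ((PySem.List.pyRange 0 nr 1).map (fun _ => nc.toNat)).sum := by
        congr 1; exact List.map_congr_left (fun i _ => h1 i)
    _ = (PySem.List.pyRange 0 nr 1).length * nc.toNat := by
        rw [List.map_const', List.sum_replicate, smul_eq_mul]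
    _ ≤ nr.toNat * nc.toNat := by
        simp [PySem.List.length_pyRange_one]

lemma pvRunB_skip (g0 : List (List Int)) (w nr nc : Int) (seen comp : List (Int × Int))
    (a b : Int) (rest : List (Int × Int))
    (h : (a, b) ∈ seen ∨ (a < 0 ∨ nr ≤ a ∨ b < 0 ∨ nc ≤ b) ∨ pvCell g0 a b = w) :
    pvRunB g0 w nr nc seen comp ((a, b) :: rest) = pvRunB g0 w nr nc seen comp rest := by
  rw [pvRunB]
  split_ifs with h1 h2 h3 <;> first | rfl | tauto

lemma pvRunB_step (g0 : List (List Int)) (w nr nc : Int) (seen comp : List (Int × Int))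
    (a b : Int) (rest : List (Int × Int))
    (h1 : (a, b) ∉ seen) (h2 : ¬(a < 0 ∨ nr ≤ a ∨ b < 0 ∨ nc ≤ b)) (h3 : pvCell g0 a b ≠ w) :
    pvRunB g0 w nr nc seen comp ((a, b) :: rest)
      = pvRunB g0 w nr nc (seen ++ [(a, b)]) (comp ++ [(a, b)])
          ((a + 1, b) :: (a - 1, b) :: (a, b + 1) :: (a, b - 1) :: rest) := by
  rw [pvRunB]
  rw [dif_neg h1, dif_neg h2, dif_neg h3, PySem.Set.add_of_not_mem h1]

lemma pvWF_append_singleton (g0 : List (List Int)) (w nr nc : Int) (seen : List (Int × Int))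
    (c : Int × Int) (hWF : pvWF g0 w nr nc seen) (hc : c ∉ seen)
    (hwin : pvWin nr nc c) (hcell : pvCell g0 c.1 c.2 ≠ w) :
    pvWF g0 w nr nc (seen ++ [c]) := by
  obtain ⟨hnd, hmem⟩ := hWF
  constructor
  · rw [List.nodup_append]
    exact ⟨hnd, List.nodup_singleton c, fun a ha b hb hab => by
      rw [List.mem_singleton] at hb; subst hb; subst hab; exact hc ha⟩
  · intro d hd
    rcases List.mem_append.1 hd with hd | hd
    · exact hmem d hd
    · rw [List.mem_singleton] at hd; subst hd; exact ⟨hwin, hcell⟩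

lemma pvSubset_append {a b l : List (Int × Int)} (h : ∀ c ∈ a, c ∈ b) :
    ∀ c ∈ a ++ l, c ∈ b ++ l := by
  intro c hc
  rcases List.mem_append.1 hc with hc | hc
  · exact List.mem_append_left _ (h c hc)
  · exact List.mem_append_right _ hc

-- THE BRIDGE: A's recursive traverse, started on the masked grid, is simulated by B's
-- stack loop; both extend the visited cells by the same list t, in the same order.
lemma pvBridge (g0 : List (List Int)) (w nr nc : Int)
    (hnr : (g0.length : Int) = nr) (hrows : ∀ r ∈ g0, (nc : Int) ≤ (r.length : Int)) :
    ∀ (f : Nat) (seen gs : List (Int × Int)) (i j : Int),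
      pvWF g0 w nr nc seen → (∀ c ∈ gs, c ∈ seen) →
      pvFree g0 w nr nc seen + 1 ≤ f →
      ∃ t : List (Int × Int),
        pvTravA w nr nc f (pvMask w seen g0, gs) i j = (pvMask w (seen ++ t) g0, gs ++ t) ∧
        pvWF g0 w nr nc (seen ++ t) ∧
        pvFree g0 w nr nc (seen ++ t) ≤ pvFree g0 w nr nc seen ∧
        ∀ (comp stack : List (Int × Int)),
          pvRunB g0 w nr nc seen comp ((i, j) :: stack)
            = pvRunB g0 w nr nc (seen ++ t) (comp ++ t) stack := by
  intro f
  induction f with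
  | zero => intro seen gs i j hWF hsub hfuel; omega
  | succ f ih =>
    intro seen gs i j hWF hsub hfuel
    by_cases h1 : (i, j) ∈ gs
    · refine ⟨[], by simp [pvTravA, h1], by simpa using hWF, by simp, ?_⟩
      intro comp stack
      simp only [List.append_nil]
      exact pvRunB_skip _ _ _ _ _ _ _ _ _ (Or.inl (hsub _ h1))
    · by_cases h2 : i < 0 ∨ nr ≤ i ∨ j < 0 ∨ nc ≤ j
      · refine ⟨[], by simp [pvTravA, h1, h2], by simpa using hWF, by simp, ?_⟩
        intro comp stack
        simp only [List.append_nil]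
        exact pvRunB_skip _ _ _ _ _ _ _ _ _ (Or.inr (Or.inl h2))
      · have hwin : pvWin nr nc (i, j) := by unfold pvWin; simp; omega
        have hmask := pvCell_mask g0 w nr nc seen hnr hrows hWF i j hwin
        by_cases h3 : pvCell (pvMask w seen g0) i j = w
        · refine ⟨[], by simp [pvTravA, h1, h2, h3], by simpa using hWF, by simp, ?_⟩
          intro comp stack
          simp only [List.append_nil]
          apply pvRunB_skip
          by_cases hin : (i, j) ∈ seen
          · exact Or.inl hin
          · rw [hmask, if_neg hin] at h3
            exact Or.inr (Or.inr h3)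
        · have hnotseen : (i, j) ∉ seen := by
            intro hin; exact h3 (by rw [hmask, if_pos hin])
          have hg0 : pvCell g0 i j ≠ w := by
            intro hg; exact h3 (by rw [hmask, if_neg hnotseen]; exact hg)
          have hset : pvSetCell (pvMask w seen g0) i j w = pvMask w (seen ++ [(i, j)]) g0 := by
            rw [pvMask_append]; rfl
          have hWF1 : pvWF g0 w nr nc (seen ++ [(i, j)]) :=
            pvWF_append_singleton g0 w nr nc seen (i, j) hWF hnotseen hwin hg0
          have hsub1 : ∀ c ∈ gs ++ [(i, j)], c ∈ seen ++ [(i, j)] := pvSubset_append hsub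
          have hfree1 : pvFree g0 w nr nc (seen ++ [(i, j)]) < pvFree g0 w nr nc seen := by
            have := pvFree_add_lt g0 w nr nc seen i j hnotseen h2 hg0
            rwa [PySem.Set.add_of_not_mem hnotseen] at this
          have hf1 : pvFree g0 w nr nc (seen ++ [(i, j)]) + 1 ≤ f := by omega
          obtain ⟨t1, he1, hW1, hle1, hr1⟩ :=
            ih (seen ++ [(i, j)]) (gs ++ [(i, j)]) (i + 1) j hWF1 hsub1 hf1
          obtain ⟨t2, he2, hW2, hle2, hr2⟩ :=
            ih (seen ++ [(i, j)] ++ t1) (gs ++ [(i, j)] ++ t1) (i - 1) j hW1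
              (pvSubset_append hsub1) (by omega)
          obtain ⟨t3, he3, hW3, hle3, hr3⟩ :=
            ih (seen ++ [(i, j)] ++ t1 ++ t2) (gs ++ [(i, j)] ++ t1 ++ t2) i (j + 1) hW2
              (pvSubset_append (pvSubset_append hsub1)) (by omega)
          obtain ⟨t4, he4, hW4, hle4, hr4⟩ :=
            ih (seen ++ [(i, j)] ++ t1 ++ t2 ++ t3) (gs ++ [(i, j)] ++ t1 ++ t2 ++ t3) i (j - 1)
              hW3 (pvSubset_append (pvSubset_append (pvSubset_append hsub1))) (by omega)
          refine ⟨[(i, j)] ++ t1 ++ t2 ++ t3 ++ t4, ?_, ?_, ?_, ?_⟩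
          · simp only [pvTravA, if_neg h1, if_neg h2, if_neg h3]
            rw [show (pvSetCell (pvMask w seen g0) i j w, PySem.Set.add gs (i, j))
                  = (pvMask w (seen ++ [(i, j)]) g0, gs ++ [(i, j)]) from by
                rw [hset, PySem.Set.add_of_not_mem h1]]
            rw [he1, he2, he3, he4]
            simp [List.append_assoc]
          · have heq : seen ++ ([(i, j)] ++ t1 ++ t2 ++ t3 ++ t4)
                = seen ++ [(i, j)] ++ t1 ++ t2 ++ t3 ++ t4 := by
              simp [List.append_assoc]
            rw [heq]; exact hW4
          · have heq : seen ++ ([(i, j)] ++ t1 ++ t2 ++ t3 ++ t4)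
                = seen ++ [(i, j)] ++ t1 ++ t2 ++ t3 ++ t4 := by
              simp [List.append_assoc]
            rw [heq]; omega
          · intro comp stack
            rw [pvRunB_step g0 w nr nc seen comp i j stack hnotseen h2 hg0]
            rw [hr1 (comp ++ [(i, j)]) ((i - 1, j) :: (i, j + 1) :: (i, j - 1) :: stack)]
            rw [hr2 (comp ++ [(i, j)] ++ t1) ((i, j + 1) :: (i, j - 1) :: stack)]
            rw [hr3 (comp ++ [(i, j)] ++ t1 ++ t2) ((i, j - 1) :: stack)]
            rw [hr4 (comp ++ [(i, j)] ++ t1 ++ t2 ++ t3) stack]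
            simp [List.append_assoc]

-- one row of the scan: A's fold over j on (masked grid, results) matches B's fold on (seen, results)
lemma pvInner (g0 : List (List Int)) (w nr nc : Int) (fuel : Nat)
    (hnr : (g0.length : Int) = nr) (hrows : ∀ r ∈ g0, (nc : Int) ≤ (r.length : Int))
    (hfuel : nr.toNat * nc.toNat < fuel) (i : Int) (hi : 0 ≤ i ∧ i < nr) :
    ∀ (js : List Int) (seen : List (Int × Int)) (res : List (List (Int × Int))),
      (∀ j ∈ js, 0 ≤ j ∧ j < nc) → pvWF g0 w nr nc seen →
      ∃ seen' res', pvWF g0 w nr nc seen' ∧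
        js.foldl (fun st j => if pvCell st.1 i j ≠ w then
            let st' := pvTravA w nr nc fuel (st.1, []) i j
            (st'.1, st.2 ++ [PySem.List.sorted2 st'.2 Prod.fst Prod.snd]) else st)
          (pvMask w seen g0, res) = (pvMask w seen' g0, res') ∧
        js.foldl (fun st j => if pvCell g0 i j ≠ w ∧ (i, j) ∉ st.1 then
            let r := pvRunB g0 w nr nc st.1 [] [(i, j)]
            (r.1, st.2 ++ [PySem.List.sorted2 r.2 Prod.fst Prod.snd]) else st)
          (seen, res) = (seen', res') := by
  intro js
  induction js with
  | nil =>
    intro seen res _ hWF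
    exact ⟨seen, res, hWF, rfl, rfl⟩
  | cons j js ihjs =>
    intro seen res hjs hWF
    have hwin : pvWin nr nc (i, j) := by
      unfold pvWin; simp
      have := hjs j (List.mem_cons_self)
      omega
    have hmask := pvCell_mask g0 w nr nc seen hnr hrows hWF i j hwin
    have hjs' : ∀ j' ∈ js, 0 ≤ j' ∧ j' < nc := fun j' hj' => hjs j' (List.mem_cons_of_mem _ hj')
    by_cases hg : pvCell (pvMask w seen g0) i j = w
    · have hgB : ¬(pvCell g0 i j ≠ w ∧ (i, j) ∉ seen) := by
        by_cases hin : (i, j) ∈ seen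
        · intro hc; exact hc.2 hin
        · rw [hmask, if_neg hin] at hg
          intro hc; exact hc.1 hg
      simp only [List.foldl_cons, if_neg (not_not_intro hg), if_neg hgB]
      exact ihjs seen res hjs' hWF
    · have hnotseen : (i, j) ∉ seen := fun hin => hg (by rw [hmask, if_pos hin])
      have hg0 : pvCell g0 i j ≠ w := fun hc => hg (by rw [hmask, if_neg hnotseen]; exact hc)
      have hfuel' : pvFree g0 w nr nc seen + 1 ≤ fuel := by
        have := pvFree_le g0 w nr nc seen
        omega
      obtain ⟨t, he, hWt, _, hrun⟩ :=
        pvBridge g0 w nr nc hnr hrows fuel seen [] i j hWF (by simp) hfuel'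
      have hrunval : pvRunB g0 w nr nc seen [] [(i, j)] = (seen ++ t, t) := by
        rw [hrun [] []]
        simp [pvRunB]
      have hgB : pvCell g0 i j ≠ w ∧ (i, j) ∉ seen := ⟨hg0, hnotseen⟩
      simp only [List.foldl_cons, if_pos hg, if_pos hgB]
      rw [he, hrunval]
      simp only [List.nil_append]
      exact ihjs (seen ++ t) (res ++ [PySem.List.sorted2 t Prod.fst Prod.snd]) hjs' hWt

-- the whole scan
lemma pvOuter (g0 : List (List Int)) (w nr nc : Int) (fuel : Nat)
    (hnr : (g0.length : Int) = nr) (hrows : ∀ r ∈ g0, (nc : Int) ≤ (r.length : Int))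
    (hfuel : nr.toNat * nc.toNat < fuel) :
    ∀ (is : List Int) (seen : List (Int × Int)) (res : List (List (Int × Int))),
      (∀ i ∈ is, 0 ≤ i ∧ i < nr) → pvWF g0 w nr nc seen →
      ∃ seen' res', pvWF g0 w nr nc seen' ∧
        is.foldl (fun st i => (PySem.List.pyRange 0 nc 1).foldl
            (fun st j => if pvCell st.1 i j ≠ w then
              let st' := pvTravA w nr nc fuel (st.1, []) i j
              (st'.1, st.2 ++ [PySem.List.sorted2 st'.2 Prod.fst Prod.snd]) else st) st)
          (pvMask w seen g0, res) = (pvMask w seen' g0, res') ∧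
        is.foldl (fun st i => (PySem.List.pyRange 0 nc 1).foldl
            (fun st j => if pvCell g0 i j ≠ w ∧ (i, j) ∉ st.1 then
              let r := pvRunB g0 w nr nc st.1 [] [(i, j)]
              (r.1, st.2 ++ [PySem.List.sorted2 r.2 Prod.fst Prod.snd]) else st) st)
          (seen, res) = (seen', res') := by
  intro is
  induction is with
  | nil =>
    intro seen res _ hWF
    exact ⟨seen, res, hWF, rfl, rfl⟩
  | cons i is ihis =>
    intro seen res his hWF
    have hi := his i (List.mem_cons_self)
    have hjs : ∀ j ∈ PySem.List.pyRange 0 nc 1, 0 ≤ j ∧ j < nc := by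
      intro j hj
      rw [PySem.List.mem_pyRange_one] at hj
      exact hj
    obtain ⟨seen1, res1, hWF1, heA, heB⟩ :=
      pvInner g0 w nr nc fuel hnr hrows hfuel i hi (PySem.List.pyRange 0 nc 1) seen res hjs hWF
    simp only [List.foldl_cons]
    rw [heA, heB]
    exact ihis seen1 res1 (fun i' hi' => his i' (List.mem_cons_of_mem _ hi')) hWF1

-- ===== VERDICT (by name: the statement is the Claim_ definition above) =====
theorem find_walled_group_positions_spec : Claim_equal_find_walled_group_positions := by
  intro grid wall_color _ hpre
  unfold Spec_find_walled_group_positions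
  simp only [find_walled_group_positions, find_walled_group_positions_alt]
  have hrows : ∀ r ∈ grid, (((PySem.List.pyGetD grid 0 []).length : Int)) ≤ (r.length : Int) := by
    intro r hr
    exact_mod_cast hpre.2 r hr
  have hfuel : ((grid.length : Int)).toNat * (((PySem.List.pyGetD grid 0 []).length : Int)).toNat
      < grid.length * (PySem.List.pyGetD grid 0 []).length + 1 := by
    simp
  have his : ∀ i ∈ PySem.List.pyRange 0 (grid.length : Int) 1, 0 ≤ i ∧ i < (grid.length : Int) := by
    intro i hi
    rw [PySem.List.mem_pyRange_one] at hi
    exact hi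
  obtain ⟨seen', res', _, heA, heB⟩ :=
    pvOuter grid wall_color (grid.length : Int) ((PySem.List.pyGetD grid 0 []).length : Int)
      (grid.length * (PySem.List.pyGetD grid 0 []).length + 1) rfl hrows hfuel
      (PySem.List.pyRange 0 (grid.length : Int) 1) [] [] his ⟨List.nodup_nil, by simp⟩
  have hmask0 : pvMask wall_color [] grid = grid := rfl
  rw [hmask0] at heA
  rw [heA, heB]
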